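-- pv_equiv track=rewrite | github.com/daniel-reich/ubiquitous-fiesta | xzisrRDwWT8prHtiQ_11.py | difference_two
-- ===== SOURCE A (Python) =====
-- def difference_two(lst):
--   output = []
--   lst = sorted(lst)
--   for a in lst:
--     for b in lst[1:]:
--       if abs(a-b) == 2 and [b, a] not in output:
--         output.append([a, b])
--   return output
-- ===== SOURCE B (Python) =====
-- def difference_two(lst):
--   c = {}
--   for x in lst:
--     c[x] = c.get(x, 0) + 1
--   output = []
--   for v in sorted(c):
--     if v + 2 in c:
--       output += [[v, v + 2]] * (c[v] * c[v + 2])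
--   return output
-- ===== Notes on version B (the rewrite author's own statement) =====
-- stated objective: faster
-- what changed: Replaces A's quadratic nested scan over all element pairs with its reversed-pair membership test against the growing output by a frequency table built in one pass and a single pass over the sorted distinct values, emitting each pair [v, v+2] with multiplicity c[v]*c[v+2].
import Mathlib
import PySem

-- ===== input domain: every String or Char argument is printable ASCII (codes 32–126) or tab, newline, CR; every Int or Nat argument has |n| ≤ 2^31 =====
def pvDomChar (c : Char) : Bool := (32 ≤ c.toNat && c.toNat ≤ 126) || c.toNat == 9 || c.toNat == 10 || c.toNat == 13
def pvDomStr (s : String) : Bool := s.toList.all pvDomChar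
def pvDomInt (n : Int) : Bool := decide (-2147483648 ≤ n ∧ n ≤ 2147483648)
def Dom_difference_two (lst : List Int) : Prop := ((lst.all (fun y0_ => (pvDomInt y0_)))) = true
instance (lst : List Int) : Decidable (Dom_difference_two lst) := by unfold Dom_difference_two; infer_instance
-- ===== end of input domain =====

-- B replaces A's quadratic nested scan with a reversed-pair membership guard by a frequency
-- table and one pass over the sorted distinct values (objective: faster).

-- ===== PORT A =====
def difference_two (lst : List Int) : List (List Int) :=
  let s := PySem.List.sorted lst (fun x => x) false
  s.foldl (fun output a =>
    (PySem.List.slice s (some 1) none).foldl (fun output b =>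
      if |a - b| = 2 ∧ [b, a] ∉ output then output ++ [[a, b]] else output) output) []

-- ===== PORT B =====
def difference_two_alt (lst : List Int) : List (List Int) :=
  let c := lst.foldl (fun d x => d.insert x (d.getD x 0 + 1)) PySem.Dict.empty
  (PySem.List.sorted c.keys (fun x => x) false).foldl (fun output v =>
    if c.contains (v + 2) then
      output ++ PySem.List.pyRepeat [[v, v + 2]] (c.getD v 0 * c.getD (v + 2) 0)
    else output) []

-- ===== PRECONDITION & SPEC =====
def Spec_difference_two (lst : List Int) (out : List (List Int)) : Prop := out = difference_two_alt lst
instance (lst : List Int) (out : List (List Int)) : Decidable (Spec_difference_two lst out) := by unfold Spec_difference_two; infer_instance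

-- ===== CLAIM (what is proved, stated in full; the proofs are below) =====
def Claim_equal_difference_two : Prop := ∀ (lst : List Int), Dom_difference_two lst → Spec_difference_two lst (difference_two lst)

-- ===== LEMMAS AND PROOFS =====

-- the pair block contributed by value a, counting multiplicities in cnt
def pvBlock (cnt : Int → Nat) (a : Int) : List (List Int) :=
  List.replicate (cnt (a + 2)) [a, a + 2]

-- A's inner loop: from an accumulator whose entries all have the form [x, x+2] and which
-- already contains [a-2, a] whenever a-2 occurs in t, it appends [a, a+2] once per
-- occurrence of a+2 in t.
theorem pv_inner (a : Int) (t : List Int) (out : List (List Int))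
    (H1 : ∀ e ∈ out, ∃ x, e = [x, x + 2])
    (H2 : a - 2 ∈ t → [a - 2, a] ∈ out) :
    t.foldl (fun acc b => if |a - b| = 2 ∧ [b, a] ∉ acc then acc ++ [[a, b]] else acc) out
      = out ++ List.replicate (t.count (a + 2)) [a, a + 2] := by
  induction t generalizing out with
  | nil => simp
  | cons b t ih =>
    have habs : |a - b| = 2 ↔ b = a + 2 ∨ b = a - 2 := by
      rw [abs_eq (by norm_num : (0:Int) ≤ 2)]; omega
    by_cases hb : b = a + 2
    · subst hb
      have hnot : [a + 2, a] ∉ out := by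
        intro hmem
        obtain ⟨x, hx⟩ := H1 _ hmem
        simp only [List.cons.injEq] at hx
        omega
      rw [List.foldl_cons, if_pos ⟨by rw [habs]; left; rfl, hnot⟩]
      rw [ih (out ++ [[a, a + 2]])
          (by intro e he
              rcases List.mem_append.1 he with h | h
              · exact H1 e h
              · exact ⟨a, by simpa using h⟩)
          (fun h => List.mem_append_left _ (H2 (List.mem_cons_of_mem _ h)))]
      simp [List.count_cons_self, List.replicate_succ, List.append_assoc]
    · have hcnt : (b :: t).count (a + 2) = t.count (a + 2) := by
        rw [List.count_cons]; simp [hb]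
      by_cases hb2 : b = a - 2
      · subst hb2
        rw [List.foldl_cons, if_neg (by
          rintro ⟨-, hnm⟩
          exact hnm (H2 List.mem_cons_self))]
        rw [ih out H1 (fun h => H2 (List.mem_cons_of_mem _ h)), hcnt]
      · rw [List.foldl_cons, if_neg (by
          rintro ⟨h2, -⟩
          rcases habs.1 h2 with h | h
          · exact hb h
          · exact hb2 h)]
        rw [ih out H1 (fun h => H2 (List.mem_cons_of_mem _ h)), hcnt]

-- A's outer loop over a suffix r of the sorted list s, the prefix p already folded in.
theorem pv_outer (s : List Int) (hs : s.Pairwise (· ≤ ·)) :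
    ∀ (r p : List Int), s = p ++ r →
    r.foldl (fun output a =>
        s.tail.foldl (fun acc b => if |a - b| = 2 ∧ [b, a] ∉ acc then acc ++ [[a, b]] else acc) output)
      (p.flatMap (pvBlock (fun x => s.count x)))
      = s.flatMap (pvBlock (fun x => s.count x)) := by
  intro r
  induction r with
  | nil => intro p hp; simp [hp]
  | cons a r ih =>
    intro p hp
    have hamem : a ∈ s := by rw [hp]; simp
    have hsne : s ≠ [] := by rintro rfl; simp at hamem
    rw [List.foldl_cons]
    rw [pv_inner a s.tail (p.flatMap (pvBlock (fun x => s.count x)))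
        (by intro e he
            rw [List.mem_flatMap] at he
            obtain ⟨x, -, hex⟩ := he
            exact ⟨x, (List.eq_of_mem_replicate hex)⟩)
        (by intro hmem
            -- a - 2 occurs in s, hence (by sortedness) in p
            have hmem' : a - 2 ∈ s := by
              cases s with
              | nil => simp at hmem
              | cons h t => exact List.mem_cons_of_mem _ hmem
            have hp2 : a - 2 ∈ p := by
              rw [hp] at hmem'
              rcases List.mem_append.1 hmem' with h | h
              · exact h
              · rcases List.mem_cons.1 h with h | h
                · omega
                · -- a ≤ every element of r, contradiction
                  have := ((List.pairwise_append.1 (hp ▸ hs)).2.1)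
                  rw [List.pairwise_cons] at this
                  have := this.1 _ h
                  omega
            rw [List.mem_flatMap]
            refine ⟨a - 2, hp2, ?_⟩
            unfold pvBlock
            have : a - 2 + 2 = a := by omega
            rw [this]
            exact List.mem_replicate.2
              ⟨Nat.pos_iff_ne_zero.mp (List.count_pos_iff.2 hamem), rfl⟩)]
    have htail : s.tail.count (a + 2) = s.count (a + 2) := by
      cases s with
      | nil => simp at hsne
      | cons h t =>
        have hh : h ≤ a := by
          rcases List.mem_cons.1 hamem with h' | h'
          · omega
          · exact (List.pairwise_cons.1 hs).1 _ h'
        simp only [List.tail_cons]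
        rw [List.count_cons]
        have hne : ¬ h = a + 2 := by omega
        simp [hne]
    rw [htail]
    have : p.flatMap (pvBlock (fun x => s.count x)) ++ List.replicate (s.count (a + 2)) [a, a + 2]
        = (p ++ [a]).flatMap (pvBlock (fun x => s.count x)) := by
      rw [List.flatMap_append]; simp [pvBlock]
    rw [this, ih (p ++ [a]) (by simp [hp])]

-- counting inside the grouped flatMap
theorem pv_count_flatMap (d : List Int) (cnt : Int → Nat) (hnd : d.Nodup) (x : Int) :
    (d.flatMap (fun v => List.replicate (cnt v) v)).count x
      = if x ∈ d then cnt x else 0 := by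
  induction d with
  | nil => simp
  | cons v d ih =>
    rw [List.flatMap_cons, List.count_append, ih hnd.of_cons, List.count_replicate]
    rcases List.nodup_cons.1 hnd with ⟨hv, -⟩
    by_cases hx : x = v
    · subst hx; simp [hv]
    · simp [Ne.symm hx, hx]

theorem pv_pairwise_flatMap (d : List Int) (cnt : Int → Nat) (hd : d.Pairwise (· ≤ ·)) :
    (d.flatMap (fun v => List.replicate (cnt v) v)).Pairwise (· ≤ ·) := by
  induction d with
  | nil => simp
  | cons v d ih =>
    rw [List.flatMap_cons, List.pairwise_append]
    refine ⟨List.pairwise_replicate.2 (Or.inr le_rfl), ih hd.of_cons, ?_⟩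
    intro y hy z hz
    rw [List.eq_of_mem_replicate hy]
    rw [List.mem_flatMap] at hz
    obtain ⟨w, hw, hzw⟩ := hz
    rw [List.eq_of_mem_replicate hzw]
    exact (List.pairwise_cons.1 hd).1 _ hw

-- the sorted list is the sorted distinct values, each repeated its multiplicity
theorem pv_sorted_group (lst : List Int) :
    PySem.List.sorted lst (fun x => x) false
      = (PySem.List.sorted (PySem.Set.ofList lst) (fun x => x) false).flatMap
          (fun v => List.replicate (lst.count v) v) := by
  set d := PySem.List.sorted (PySem.Set.ofList lst) (fun x => x) false with hd
  have hdnd : d.Nodup := (PySem.List.sorted_perm _ _ _).nodup_iff.2 (PySem.Set.nodup_ofList lst)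
  have hperm : (d.flatMap (fun v => List.replicate (lst.count v) v)).Perm lst := by
    rw [List.perm_iff_count]
    intro x
    rw [pv_count_flatMap d _ hdnd x]
    by_cases hx : x ∈ lst
    · rw [if_pos (((PySem.List.sorted_perm _ _ _).mem_iff).2 ((PySem.Set.mem_ofList lst x).2 hx))]
    · have hxd : x ∉ d := fun h =>
        hx ((PySem.Set.mem_ofList lst x).1 (((PySem.List.sorted_perm _ _ _).mem_iff).1 h))
      simp [hxd, List.count_eq_zero_of_not_mem hx]
  refine List.Perm.eq_of_pairwise (fun a b _ _ h1 h2 => le_antisymm h1 h2) ?_ ?_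
      ((PySem.List.sorted_perm lst (fun x => x) false).trans hperm.symm)
  · exact PySem.List.sorted_pairwise lst (fun x => x)
  · exact pv_pairwise_flatMap d _ (PySem.List.sorted_pairwise _ (fun x => x))

theorem pv_flatMap_replicate (n : Nat) (v : Int) (f : Int → List (List Int)) :
    (List.replicate n v).flatMap f = (List.replicate n (f v)).flatten := by
  induction n with
  | zero => simp
  | succ n ih => rw [List.replicate_succ, List.replicate_succ, List.flatMap_cons,
      List.flatten_cons, ih]

theorem pv_flatten_replicate (n k : Nat) (y : List Int) :
    (List.replicate n (List.replicate k y)).flatten = List.replicate (n * k) y := by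
  induction n with
  | zero => simp
  | succ n ih => rw [List.replicate_succ, List.flatten_cons, ih, Nat.succ_mul,
      Nat.add_comm, List.replicate_add]

-- ===== VERDICT (by name: the statement is the Claim_ definition above) =====
theorem difference_two_spec : Claim_equal_difference_two := by
  intro lst _
  unfold Spec_difference_two difference_two difference_two_alt
  rw [PySem.Dict.foldl_insert_getD_add_one_eq_counter]
  simp only [PySem.List.slice_from_one, PySem.Dict.keys_counter]
  set s := PySem.List.sorted lst (fun x => x) false with hs
  set d := PySem.List.sorted (PySem.Set.ofList lst) (fun x => x) false with hd
  -- A's side: the nested loop produces the blocks of s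
  have hA : s.foldl (fun output a =>
      s.tail.foldl (fun acc b => if |a - b| = 2 ∧ [b, a] ∉ acc then acc ++ [[a, b]] else acc) output) []
      = s.flatMap (pvBlock (fun x => s.count x)) := by
    have := pv_outer s (PySem.List.sorted_pairwise lst (fun x => x)) s [] rfl
    simpa using this
  rw [hA]
  -- B's side: counter lookups are counts, the guard is absorbed by a zero count
  have hB : ∀ out, d.foldl (fun output v =>
      if (PySem.Dict.counter lst).contains (v + 2) then
        output ++ PySem.List.pyRepeat [[v, v + 2]] ((PySem.Dict.counter lst).getD v 0 * (PySem.Dict.counter lst).getD (v + 2) 0)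
      else output) out
      = out ++ d.flatMap (fun v => List.replicate (lst.count v * lst.count (v + 2)) [v, v + 2]) := by
    intro out
    have hstep : ∀ (acc : List (List Int)) (v : Int), v ∈ d →
        (fun (output : List (List Int)) (v : Int) =>
          if (PySem.Dict.counter lst).contains (v + 2) then
            output ++ PySem.List.pyRepeat [[v, v + 2]] ((PySem.Dict.counter lst).getD v 0 * (PySem.Dict.counter lst).getD (v + 2) 0)
          else output) acc v
        = acc ++ List.replicate (lst.count v * lst.count (v + 2)) [v, v + 2] := by
      intro acc v _
      simp only []
      rw [PySem.List.pyRepeat_singleton, PySem.Dict.getD_counter, PySem.Dict.getD_counter,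
        PySem.Dict.contains_counter]
      by_cases hc : lst.contains (v + 2)
      · rw [if_pos hc]
        rw [← Nat.cast_mul, Int.toNat_natCast]
      · rw [if_neg hc]
        have hz : lst.count (v + 2) = 0 :=
          List.count_eq_zero_of_not_mem (by simpa using hc)
        simp [hz]
    rw [PySem.List.foldl_congr_mem _ _ _ _ hstep, PySem.List.foldl_append_eq_flatMap]
  rw [hB []]
  -- bridge: group A's pass over s into B's pass over d
  rw [List.nil_append]
  have hcnt : (fun x => List.count x s) = fun x => List.count x lst :=
    funext fun x => (PySem.List.sorted_perm lst (fun y => y) false).count_eq x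
  rw [hcnt]
  conv_lhs => rw [hs, pv_sorted_group lst, ← hd]
  rw [List.flatMap_assoc]
  have hfun : (fun x => (List.replicate (List.count x lst) x).flatMap (pvBlock (fun x => List.count x lst)))
      = fun v => List.replicate (List.count v lst * List.count (v + 2) lst) [v, v + 2] := by
    funext v
    rw [pv_flatMap_replicate]
    simp only [pvBlock]
    rw [pv_flatten_replicate]
  rw [hfun]
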